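-- pv_equiv track=rewrite | github.com/ilms49898723/Guess_Number_AI | main.py | is_valid_answer
-- ===== SOURCE A (Python) =====
-- def is_valid_answer(answer_number: str) -> bool:
--     """
--     Check whether the answer number is valid.
--     That is, no duplicated digits in the number and the length of it is 4.
--
--     :param answer_number: answer number to check
--     :type answer_number: str
--     :return: True if valid, False otherwise
--     :rtype: bool
--     """
--     target = answer_number
--     if len(target) != 4:
--         return False
--     if not target.isnumeric():
--         return False
--     for i in range(3):
--         if target[i] in target[i + 1:]:
--             return False
--     return True
-- ===== SOURCE B (Python) =====
-- def is_valid_answer(answer_number: str) -> bool: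
--     """Valid iff: length 4, numeric, all digits distinct (set-cardinality test)."""
--     return (len(answer_number) == 4
--             and answer_number.isnumeric()
--             and len(set(answer_number)) == 4)
-- ===== Notes on version B (the rewrite author's own statement) =====
-- stated objective: simpler
-- what changed: Replaces the indexed suffix-scan loop (target[i] in target[i+1:]) with a single set-cardinality uniqueness test len(set(s)) == 4, folded with the length and isnumeric guards into one boolean expression.
import Mathlib
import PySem

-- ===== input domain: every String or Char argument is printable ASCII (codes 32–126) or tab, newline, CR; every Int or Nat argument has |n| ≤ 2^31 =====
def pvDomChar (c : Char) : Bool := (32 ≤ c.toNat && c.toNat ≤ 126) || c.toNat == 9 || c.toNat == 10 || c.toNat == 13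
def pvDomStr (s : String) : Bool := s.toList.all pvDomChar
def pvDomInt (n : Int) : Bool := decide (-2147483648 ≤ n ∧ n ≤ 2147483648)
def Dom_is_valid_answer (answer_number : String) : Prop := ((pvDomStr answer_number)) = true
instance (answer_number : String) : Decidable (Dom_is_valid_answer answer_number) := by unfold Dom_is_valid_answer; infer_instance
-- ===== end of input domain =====

-- B replaces A's indexed suffix-scan duplicate loop with a set-cardinality uniqueness test (simpler).
-- '.isnumeric()' is ported as PySem.Chars.strIsdigit — exact on the ASCII domain Dom_, where
-- isnumeric, isdigit and isdecimal coincide (nonempty, all chars '0'-'9').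

-- ===== PORT A =====
def is_valid_answer (answer_number : String) : Bool :=
  let target := answer_number.toList
  if PySem.Chars.len target ≠ 4 then false
  else if !PySem.Chars.strIsdigit target then false
  else if (PySem.List.pyRange 0 3 1).any (fun i =>
      -- 'target[i] in target[i+1:]': a one-char substring test = list membership
      (PySem.List.slice target (some (i + 1)) none).contains
        (PySem.List.pyGetD target i ' ')) then false
  else true

-- ===== PORT B =====
def is_valid_answer_alt (answer_number : String) : Bool :=
  let cs := answer_number.toList
  PySem.Chars.len cs == 4 && PySem.Chars.strIsdigit cs
    && PySem.Set.len (PySem.Set.ofList cs) == 4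

-- ===== PRECONDITION & SPEC =====
def Spec_is_valid_answer (answer_number : String) (out : Bool) : Prop := out = is_valid_answer_alt answer_number
instance (answer_number : String) (out : Bool) : Decidable (Spec_is_valid_answer answer_number out) := by unfold Spec_is_valid_answer; infer_instance

-- ===== CLAIM (what is proved, stated in full; the proofs are below) =====
def Claim_equal_is_valid_answer : Prop := ∀ (answer_number : String), Dom_is_valid_answer answer_number → Spec_is_valid_answer answer_number (is_valid_answer answer_number)

-- ===== LEMMAS AND PROOFS =====

-- On a length-4 list, A's suffix scan finds a duplicate iff B's set has fewer than 4 elements.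
set_option maxRecDepth 8192 in
theorem pv_key (a b c d : Char) :
    ((PySem.List.pyRange 0 3 1).any (fun i =>
        (PySem.List.slice [a, b, c, d] (some (i + 1)) none).contains
          (PySem.List.pyGetD [a, b, c, d] i ' ')))
      = !(PySem.Set.len (PySem.Set.ofList [a, b, c, d]) == 4) := by
  have hr : PySem.List.pyRange 0 3 1 = ([0, 1, 2] : List Int) := by decide
  rw [hr]
  simp only [List.any_cons, List.any_nil, PySem.Set.ofList, PySem.Set.len,
    List.foldl, PySem.Set.add, PySem.Set.contains, PySem.List.pyGetD,
    PySem.List.pyGet?, PySem.List.pyIdx?, PySem.List.slice, PySem.List.clampIdx]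
  norm_num
  simp only [show Int.toNat 2 = 2 from rfl, show Int.toNat 3 = 3 from rfl]
  norm_num
  split_ifs <;> simp_all <;> tauto

-- ===== VERDICT (by name: the statement is the Claim_ definition above) =====
theorem is_valid_answer_spec : Claim_equal_is_valid_answer := by
  intro s _
  unfold Spec_is_valid_answer is_valid_answer is_valid_answer_alt
  by_cases hlen : PySem.Chars.len s.toList = 4
  · have h4 : s.toList.length = 4 := by
      simp only [PySem.Chars.len] at hlen; exact_mod_cast hlen
    obtain ⟨a, b, c, d, h⟩ : ∃ a b c d, s.toList = [a, b, c, d] := by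
      match hl : s.toList, h4 with
      | [a, b, c, d], _ => exact ⟨a, b, c, d, rfl⟩
    rw [h]
    cases hdig : PySem.Chars.strIsdigit [a, b, c, d] with
    | false => simp [hdig]
    | true =>
      simp only [hdig, pv_key]
      cases hset : (PySem.Set.len (PySem.Set.ofList [a, b, c, d]) == 4) <;>
        simp [PySem.Chars.len]
  · simp only [if_pos hlen]
    have hlen' : (PySem.Chars.len s.toList == 4) = false := by
      simpa using hlen
    simp only [hlen', Bool.false_and]
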